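-- pv_equiv track=rewrite | github.com/mlearnprojects/daily-programmer | 336_easy/python_solution_1/main.py | cannibal
-- ===== SOURCE A (Python) =====
-- def cannibal(input_numbers, borders):
--     """
--     >>> cannibal([6, 20, 15, 17, 14, 13, 4, 8, 2, 1, 10], [7, 10, 15])
--     [8, 7, 5]
--     >>> cannibal([3, 3, 3, 2, 2, 2, 1, 1, 1], [4])
--     [1]
--     >>> cannibal([21, 9, 5, 8, 10, 1, 3], [10, 15])
--     [4, 2]
--     >>> cannibal([1, 2, 3, 4, 5], [5])
--     [2]
--     """
--     sorted_numbers = sorted(set(input_numbers), reverse=True)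
--
--     cannibals = []
--     for border in borders:
--         numbers = sorted_numbers[:]
--         number_of_cannibals = 0
--         for number_index, number in enumerate(numbers):
--             if number >= border:
--                 number_of_cannibals += 1
--             else:
--                 victims_needed = border - number
--                 remaining_victims = numbers[number_index + 1:]
--
--                 if len(remaining_victims) >= victims_needed:
--                     number_of_cannibals += 1
--                     del numbers[-victims_needed:]
--                 else:
--                     break
--
--         cannibals.append(number_of_cannibals)
--
--     return cannibals
-- ===== SOURCE B (Python) =====
-- def cannibal(input_numbers, borders):
--     desc = sorted(set(input_numbers), reverse=True)
--     n = len(desc)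
--     prefix = [0]
--     for v in desc:
--         prefix.append(prefix[-1] + v)
--     out = []
--     for border in borders:
--         # k = length of the leading run of elements >= border (desc is descending)
--         lo, hi = 0, n
--         while lo < hi:
--             mid = (lo + hi) // 2
--             if desc[mid] >= border:
--                 lo = mid + 1
--             else:
--                 hi = mid
--         k = lo
--         # t = max number of further cannibals; feasibility of t is
--         # t*border - (sum of next t elements) + t <= n - k, monotone in t
--         lo, hi = 0, n - k
--         while lo < hi:
--             mid = (lo + hi + 1) // 2
--             if mid * border - (prefix[k + mid] - prefix[k]) + mid <= n - k:
--                 lo = mid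
--             else:
--                 hi = mid - 1
--         out.append(k + lo)
--     return out
-- ===== Notes on version B (the rewrite author's own statement) =====
-- stated objective: faster
-- what changed: Per border, A copies the sorted distinct list and greedily rescans it, slicing numbers[index+1:] and deleting the tail at every step; B precomputes one prefix-sum array and answers each border with two binary searches (length k of the leading run >= border, then the largest feasible extra count t, whose feasibility predicate t*border - segment_sum + t <= n - k is monotone in t), so no per-border scan or list copy remains.
import Mathlib
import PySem

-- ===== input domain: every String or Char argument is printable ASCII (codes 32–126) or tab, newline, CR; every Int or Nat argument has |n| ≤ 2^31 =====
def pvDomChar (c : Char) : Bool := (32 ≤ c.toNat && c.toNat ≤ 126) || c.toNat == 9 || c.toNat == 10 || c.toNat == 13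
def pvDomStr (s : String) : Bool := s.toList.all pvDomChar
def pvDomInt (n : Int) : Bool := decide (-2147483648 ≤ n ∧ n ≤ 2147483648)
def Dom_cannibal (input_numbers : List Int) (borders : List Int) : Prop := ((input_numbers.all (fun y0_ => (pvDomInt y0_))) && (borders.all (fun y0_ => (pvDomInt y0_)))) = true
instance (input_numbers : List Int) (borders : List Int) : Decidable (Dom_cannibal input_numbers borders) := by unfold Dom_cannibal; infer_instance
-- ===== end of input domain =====

-- B replaces A's per-border greedy rescan (slice + delete of the live list) by
-- prefix sums and two binary searches per border; same return value, both total.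

-- ===== PORT A =====
-- A's inner loop: `numbers` is the LIVE list A mutates (enumerate walks it while
-- `del numbers[-victims:]` shortens it); each step is A's step for step:
-- slice `numbers[index+1:]`, compare its length, delete the last `victims`
-- elements by `take` (victims ≥ 1 here).  `fuel` is only a totality guard
-- (every step moves `index` up by 1 and never lengthens the list, so
-- `numbers.length` steps always suffice); `getD index 0` is only read under
-- `index < numbers.length`.
def cannibalLoopA (border : Int) (fuel : Nat) (numbers : List Int) (index : Nat) (count : Int) : Int :=
  match fuel with
  | 0 => count
  | fuel + 1 =>
    if index < numbers.length then
      let number := numbers.getD index 0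
      if number ≥ border then
        cannibalLoopA border fuel numbers (index + 1) (count + 1)
      else
        let victims := border - number
        let remaining := numbers.drop (index + 1)
        if (remaining.length : Int) ≥ victims then
          cannibalLoopA border fuel (numbers.take (numbers.length - victims.toNat)) (index + 1) (count + 1)
        else
          count
    else
      count

-- sorted(set(input_numbers), reverse=True); the per-border `numbers[:]` copy is
-- the identity on immutable lists.
def cannibal (input_numbers : List Int) (borders : List Int) : List Int :=
  let sorted_numbers := PySem.List.sorted (PySem.Set.ofList input_numbers) (fun x => x) true
  borders.map (fun border => cannibalLoopA border sorted_numbers.length sorted_numbers 0 0)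

-- ===== PORT B =====
-- B's first while loop: binary search for the length k of the leading run of
-- elements ≥ border.  `fuel` is only a totality guard for the while loop
-- (hi - lo shrinks every iteration, so hi - lo ≤ fuel runs it to lo = hi).
def bsK (desc : List Int) (border : Int) : Nat → Nat → Nat → Nat
  | 0, lo, _ => lo
  | fuel + 1, lo, hi =>
    if lo < hi then
      let mid := (lo + hi) / 2
      if desc.getD mid 0 ≥ border then bsK desc border fuel (mid + 1) hi
      else bsK desc border fuel lo mid
    else lo

-- B's second while loop: binary search for the largest feasible t
-- (mid*border - (pre[k+mid] - pre[k]) + mid ≤ n - k); same fuel guard.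
def bsT (pre : List Int) (border : Int) (n k : Nat) : Nat → Nat → Nat → Nat
  | 0, lo, _ => lo
  | fuel + 1, lo, hi =>
    if lo < hi then
      let mid := (lo + hi + 1) / 2
      if (mid : Int) * border - (pre.getD (k + mid) 0 - pre.getD k 0) + (mid : Int) ≤ (n : Int) - (k : Int) then
        bsT pre border n k fuel mid hi
      else bsT pre border n k fuel lo (mid - 1)
    else lo

-- `prefix.append(prefix[-1] + v)`: `prefix` is never empty, so prefix[-1] is its
-- last element (getLastD).
def cannibal_alt (input_numbers : List Int) (borders : List Int) : List Int :=
  let desc := PySem.List.sorted (PySem.Set.ofList input_numbers) (fun x => x) true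
  let n := desc.length
  let pre := desc.foldl (fun p v => p ++ [p.getLastD 0 + v]) [0]
  borders.map (fun border =>
    let k := bsK desc border n 0 n
    let t := bsT pre border n k (n - k) 0 (n - k)
    ((k + t : Nat) : Int))

-- ===== PRECONDITION & SPEC =====
def Spec_cannibal (input_numbers : List Int) (borders : List Int) (out : List Int) : Prop := out = cannibal_alt input_numbers borders
instance (input_numbers : List Int) (borders : List Int) (out : List Int) : Decidable (Spec_cannibal input_numbers borders out) := by unfold Spec_cannibal; infer_instance

-- ===== CLAIM (what is proved, stated in full; the proofs are below) =====
def Claim_equal_cannibal : Prop := ∀ (input_numbers : List Int) (borders : List Int), Dom_cannibal input_numbers borders → Spec_cannibal input_numbers borders (cannibal input_numbers borders)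

-- ===== LEMMAS AND PROOFS =====

-- Proof-side pointer rendering of A's loop: fixed list, position i, live length r.
def ptrLoop (nums : List Int) (border : Int) : Nat → Nat → Nat → Int → Int
  | 0, _, _, count => count
  | fuel + 1, i, r, count =>
    if i < r then
      let x := nums.getD i 0
      if x ≥ border then
        ptrLoop nums border fuel (i + 1) r (count + 1)
      else
        let need := border - x
        if (r : Int) - i - 1 ≥ need then
          ptrLoop nums border fuel (i + 1) (r - need.toNat) (count + 1)
        else
          count
    else
      count

-- Greedy stopping point: the t at which A's second phase stops.
def Tstar (nk : Nat) (okB : Nat → Bool) (m : Nat) : Nat :=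
  if h : m < nk ∧ okB (m + 1) then Tstar nk okB (m + 1) else m
  termination_by nk - m
  decreasing_by omega

-- A's live list is always a prefix `nums.take r` of the fixed sorted list;
-- the pointer loop tracks only the pair (i, r), consuming fuel in lockstep.
lemma loop_eq (nums : List Int) (border : Int) :
    ∀ (fuel i r : Nat) (count : Int), r ≤ nums.length →
      cannibalLoopA border fuel (nums.take r) i count = ptrLoop nums border fuel i r count := by
  intro fuel
  induction fuel with
  | zero => intro i r count _; rfl
  | succ fuel ih =>
    intro i r count hr
    rw [cannibalLoopA, ptrLoop]
    have hlen : (nums.take r).length = r := by simp [Nat.min_eq_left hr]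
    rw [hlen]
    by_cases hir : i < r
    · simp only [hir, if_true]
      have hget : (nums.take r).getD i 0 = nums.getD i 0 := by
        simp [List.getD, hir]
      rw [hget]
      by_cases hge : nums.getD i 0 ≥ border
      · simp only [hge, if_true]
        exact ih (i + 1) r (count + 1) hr
      · simp only [hge, if_false]
        have hrem : ((nums.take r).drop (i + 1)).length = r - (i + 1) := by
          simp [hlen]
        rw [hrem]
        have hcond : (((r - (i + 1) : Nat) : Int) ≥ border - nums.getD i 0)
            ↔ ((r : Int) - i - 1 ≥ border - nums.getD i 0) := by omega
        by_cases hc : ((r : Int) - i - 1 ≥ border - nums.getD i 0)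
        · simp only [hcond.mpr hc, hc, if_pos]
          rw [List.take_take]
          have hmin : min (r - (border - nums.getD i 0).toNat) r
              = r - (border - nums.getD i 0).toNat := by omega
          rw [hmin]
          exact ih (i + 1) (r - (border - nums.getD i 0).toNat) (count + 1) (by omega)
        · have : ¬ (((r - (i + 1) : Nat) : Int) ≥ border - nums.getD i 0) := by
            rw [hcond]; exact hc
          simp only [this, hc, if_false]
    · simp [hir]


lemma getD_anti (desc : List Int) (h : desc.Pairwise (fun a b => b ≤ a))
    {i j : Nat} (hij : i ≤ j) (hj : j < desc.length) : desc.getD j 0 ≤ desc.getD i 0 := by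
  rcases Nat.lt_or_ge i j with hlt | hge
  · rw [List.getD_eq_getElem desc 0 hj, List.getD_eq_getElem desc 0 (lt_of_le_of_lt hij hj)]
    exact List.pairwise_iff_getElem.mp h i j _ hj hlt
  · have : i = j := le_antisymm hij hge
    subst this; rfl

def kGood (desc : List Int) (border : Int) (k : Nat) : Prop :=
  (∀ i, i < k → border ≤ desc.getD i 0) ∧
  (k = desc.length ∨ desc.getD k 0 < border) ∧ k ≤ desc.length

lemma bsK_spec (desc : List Int) (border : Int)
    (hp : desc.Pairwise (fun a b => b ≤ a)) :
    ∀ (fuel lo hi : Nat), lo ≤ hi → hi ≤ desc.length → hi - lo ≤ fuel →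
      (∀ i, i < lo → border ≤ desc.getD i 0) →
      (∀ i, hi ≤ i → i < desc.length → desc.getD i 0 < border) →
      kGood desc border (bsK desc border fuel lo hi) := by
  intro fuel
  induction fuel with
  | zero =>
    intro lo hi hlh hhn hf hlo hhi
    have : lo = hi := by omega
    subst this
    rw [bsK]
    refine ⟨hlo, ?_, by omega⟩
    by_cases hln : lo = desc.length
    · exact Or.inl hln
    · exact Or.inr (hhi lo le_rfl (by omega))
  | succ fuel ih =>
    intro lo hi hlh hhn hf hlo hhi
    rw [bsK]
    by_cases h : lo < hi
    · simp only [h, if_true]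
      by_cases hc : desc.getD ((lo + hi) / 2) 0 ≥ border
      · simp only [hc, if_true]
        refine ih ((lo + hi) / 2 + 1) hi (by omega) hhn (by omega) ?_ hhi
        intro i hi'
        exact le_trans hc (getD_anti desc hp (by omega) (by omega))
      · simp only [hc, if_false]
        refine ih lo ((lo + hi) / 2) (by omega) (by omega) (by omega) hlo ?_
        intro i hmi hin
        calc desc.getD i 0 ≤ desc.getD ((lo + hi) / 2) 0 := getD_anti desc hp hmi hin
          _ < border := by omega
    · simp only [h, if_false]
      have : lo = hi := by omega
      subst this
      refine ⟨hlo, ?_, by omega⟩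
      by_cases hln : lo = desc.length
      · exact Or.inl hln
      · exact Or.inr (hhi lo le_rfl (by omega))

def Sseg (desc : List Int) (k t : Nat) : Int := ((desc.drop k).take t).sum

def okB (desc : List Int) (border : Int) (k t : Nat) : Bool :=
  decide ((t : Int) * border - Sseg desc k t + t ≤ (desc.length : Int) - k)

lemma Sseg_succ (desc : List Int) (k t : Nat) (h : k + t < desc.length) :
    Sseg desc k (t + 1) = Sseg desc k t + desc.getD (k + t) 0 := by
  unfold Sseg
  rw [List.take_add_one]
  have h1 : (desc.drop k)[t]? = some desc[k + t] := by
    rw [List.getElem?_drop]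
    exact List.getElem?_eq_getElem h
  rw [h1, List.getD_eq_getElem desc 0 h]
  simp

lemma rest_lt (desc : List Int) (border : Int) (k : Nat)
    (hp : desc.Pairwise (fun a b => b ≤ a)) (hk : kGood desc border k)
    {i : Nat} (hi : k + i < desc.length) : desc.getD (k + i) 0 < border := by
  have hkn : k < desc.length := by omega
  rcases hk.2.1 with he | hv
  · omega
  · exact lt_of_le_of_lt (getD_anti desc hp (by omega) hi) hv

lemma okB_succ (desc : List Int) (border : Int) (k : Nat)
    (hp : desc.Pairwise (fun a b => b ≤ a)) (hk : kGood desc border k)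
    {t : Nat} (ht : k + t < desc.length)
    (h : okB desc border k (t + 1) = true) : okB desc border k t = true := by
  have hx := rest_lt desc border k hp hk ht
  simp only [okB, decide_eq_true_eq] at h ⊢
  rw [Sseg_succ desc k t ht] at h
  push_cast at h ⊢
  nlinarith [h, hx]

lemma okB_mono (desc : List Int) (border : Int) (k : Nat)
    (hp : desc.Pairwise (fun a b => b ≤ a)) (hk : kGood desc border k)
    {s t : Nat} (hst : s ≤ t) (ht : t ≤ desc.length - k)
    (h : okB desc border k t = true) : okB desc border k s = true := by
  induction t with
  | zero => have : s = 0 := by omega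
            subst this; exact h
  | succ t iht =>
    rcases Nat.lt_or_ge s (t + 1) with hlt | hge
    · have hkk : k ≤ desc.length := hk.2.2
      exact iht (by omega) (by omega) (okB_succ desc border k hp hk (by omega) h)
    · have : s = t + 1 := by omega
      subst this; exact h

def tGood (desc : List Int) (border : Int) (k t : Nat) : Prop :=
  okB desc border k t = true ∧
  (t = desc.length - k ∨ okB desc border k (t + 1) = false) ∧ t ≤ desc.length - k

lemma tGood_unique (desc : List Int) (border : Int) (k : Nat)
    (hp : desc.Pairwise (fun a b => b ≤ a)) (hk : kGood desc border k)
    {t1 t2 : Nat} (h1 : tGood desc border k t1) (h2 : tGood desc border k t2) : t1 = t2 := by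
  by_contra hne
  rcases Nat.lt_or_ge t1 t2 with hlt | hge
  · rcases h1.2.1 with he | hf
    · have := h2.2.2; omega
    · have := okB_mono desc border k hp hk (show t1 + 1 ≤ t2 by omega) h2.2.2 h2.1
      rw [this] at hf; exact Bool.true_eq_false.mp hf
  · rcases h2.2.1 with he | hf
    · have := h1.2.2; omega
    · have hlt2 : t2 < t1 := by omega
      have := okB_mono desc border k hp hk (show t2 + 1 ≤ t1 by omega) h1.2.2 h1.1
      rw [this] at hf; exact Bool.true_eq_false.mp hf

lemma Tstar_spec (desc : List Int) (border : Int) (k : Nat) :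
    ∀ m, m ≤ desc.length - k → okB desc border k m = true →
      tGood desc border k (Tstar (desc.length - k) (okB desc border k) m) := by
  have H : ∀ d m, desc.length - k - m = d → m ≤ desc.length - k → okB desc border k m = true →
      tGood desc border k (Tstar (desc.length - k) (okB desc border k) m) := by
    intro d
    induction d with
    | zero =>
      intro m hd hm hok
      have hmeq : m = desc.length - k := by omega
      rw [Tstar, dif_neg (by omega)]
      exact ⟨hok, Or.inl hmeq, hm⟩
    | succ d ihd =>
      intro m hd hm hok
      rw [Tstar]
      by_cases h : m < desc.length - k ∧ okB desc border k (m + 1) = true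
      · rw [dif_pos h]
        exact ihd (m + 1) (by omega) (by omega) h.2
      · rw [dif_neg h]
        refine ⟨hok, ?_, hm⟩
        by_cases hm2 : m = desc.length - k
        · exact Or.inl hm2
        · have : ¬ okB desc border k (m + 1) = true := by
            intro hc; exact h ⟨by omega, hc⟩
          exact Or.inr (by simpa using this)
  intro m hm hok
  exact H (desc.length - k - m) m rfl hm hok

lemma foldl_scanl (xs : List Int) (acc : List Int) (s : Int) (h : acc.getLastD 0 = s) :
    xs.foldl (fun p v => p ++ [p.getLastD 0 + v]) acc = acc ++ (List.scanl (· + ·) s xs).tail := by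
  induction xs generalizing acc s with
  | nil => simp
  | cons x xs ih =>
    simp only [List.foldl_cons, List.scanl_cons, List.tail_cons, h]
    rw [ih (acc ++ [s + x]) (s + x) (by simp)]
    cases xs <;> simp

lemma scanl_getD (xs : List Int) (s : Int) (j : Nat) (hj : j ≤ xs.length) :
    (List.scanl (· + ·) s xs).getD j 0 = s + (xs.take j).sum := by
  induction xs generalizing s j with
  | nil => have : j = 0 := Nat.le_zero.mp (by simpa using hj); subst this; simp
  | cons x xs ih =>
    cases j with
    | zero => simp
    | succ j =>
      simp only [List.scanl_cons, List.getD_cons_succ, List.take_succ_cons, List.sum_cons]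
      rw [ih (s + x) j (by simpa using hj)]; ring

lemma pre_getD (desc : List Int) (j : Nat) (hj : j ≤ desc.length) :
    (desc.foldl (fun p v => p ++ [p.getLastD 0 + v]) [0]).getD j 0 = (desc.take j).sum := by
  rw [foldl_scanl desc [0] 0 rfl]
  have : ([0] : List Int) ++ (List.scanl (· + ·) 0 desc).tail = List.scanl (· + ·) 0 desc := by
    cases desc <;> simp
  rw [this, scanl_getD desc 0 j hj, zero_add]

lemma sum_take_add (desc : List Int) (k t : Nat) :
    (desc.take (k + t)).sum = (desc.take k).sum + Sseg desc k t := by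
  rw [List.take_add, List.sum_append]; rfl

lemma pre_cond (desc : List Int) (border : Int) (k t : Nat)
    (hk : k ≤ desc.length) (ht : t ≤ desc.length - k) :
    ((t : Int) * border -
        ((desc.foldl (fun p v => p ++ [p.getLastD 0 + v]) [0]).getD (k + t) 0 -
         (desc.foldl (fun p v => p ++ [p.getLastD 0 + v]) [0]).getD k 0) + (t : Int)
      ≤ (desc.length : Int) - (k : Int)) ↔ okB desc border k t = true := by
  rw [pre_getD desc (k + t) (by omega), pre_getD desc k hk, sum_take_add]
  unfold okB
  rw [decide_eq_true_eq]
  constructor <;> intro h <;> linarith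

lemma bsT_spec (desc : List Int) (border : Int) (k : Nat)
    (hp : desc.Pairwise (fun a b => b ≤ a)) (hk : kGood desc border k) :
    ∀ (fuel lo hi : Nat), lo ≤ hi → hi ≤ desc.length - k → hi - lo ≤ fuel →
      okB desc border k lo = true →
      (∀ t, hi < t → t ≤ desc.length - k → okB desc border k t = false) →
      tGood desc border k
        (bsT (desc.foldl (fun p v => p ++ [p.getLastD 0 + v]) [0]) border desc.length k fuel lo hi) := by
  have hkn : k ≤ desc.length := hk.2.2
  intro fuel
  induction fuel with
  | zero =>
    intro lo hi hlh hhn hf hlo hhi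
    have : lo = hi := by omega
    subst this
    rw [bsT]
    refine ⟨hlo, ?_, by omega⟩
    by_cases he : lo = desc.length - k
    · exact Or.inl he
    · exact Or.inr (hhi (lo + 1) (by omega) (by omega))
  | succ fuel ih =>
    intro lo hi hlh hhn hf hlo hhi
    rw [bsT]
    by_cases h : lo < hi
    · simp only [h, if_true]
      have hmid1 : lo < (lo + hi + 1) / 2 := by omega
      have hmid2 : (lo + hi + 1) / 2 ≤ hi := by omega
      by_cases hc0 : ((((lo + hi + 1) / 2 : Nat) : Int) * border -
          ((desc.foldl (fun p v => p ++ [p.getLastD 0 + v]) [0]).getD (k + (lo + hi + 1) / 2) 0 -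
           (desc.foldl (fun p v => p ++ [p.getLastD 0 + v]) [0]).getD k 0) + (((lo + hi + 1) / 2 : Nat) : Int)
        ≤ (desc.length : Int) - (k : Int))
      · rw [if_pos hc0]
        have hc : okB desc border k ((lo + hi + 1) / 2) = true :=
          (pre_cond desc border k ((lo + hi + 1) / 2) hkn (by omega)).mp hc0
        exact ih ((lo + hi + 1) / 2) hi hmid2 hhn (by omega) hc hhi
      · rw [if_neg hc0]
        have hc : ¬ okB desc border k ((lo + hi + 1) / 2) = true := fun hx =>
          hc0 ((pre_cond desc border k ((lo + hi + 1) / 2) hkn (by omega)).mpr hx)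
        refine ih lo ((lo + hi + 1) / 2 - 1) (by omega) (by omega) (by omega) hlo ?_
        intro t htm htn
        by_contra hok
        have hok' : okB desc border k t = true := by
          cases hx : okB desc border k t
          · exact absurd hx hok
          · rfl
        exact hc (okB_mono desc border k hp hk (by omega) htn hok')
    · simp only [h, if_false]
      have : lo = hi := by omega
      subst this
      refine ⟨hlo, ?_, by omega⟩
      by_cases he : lo = desc.length - k
      · exact Or.inl he
      · exact Or.inr (hhi (lo + 1) (by omega) (by omega))

lemma Tstar_step (nk : Nat) (okb : Nat → Bool) (m : Nat) (h : m < nk ∧ okb (m + 1) = true) :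
    Tstar nk okb m = Tstar nk okb (m + 1) := by
  rw [Tstar, dif_pos h]

lemma Tstar_stop (desc : List Int) (border : Int) (k : Nat)
    (hp : desc.Pairwise (fun a b => b ≤ a)) (hk : kGood desc border k)
    (m p : Nat) (hmp : m + p = desc.length - k)
    (hpI : (p : Int) = (m : Int) * border - Sseg desc k m) :
    Tstar (desc.length - k) (okB desc border k) m = m := by
  have hkn : k ≤ desc.length := hk.2.2
  rw [Tstar, dif_neg]
  rintro ⟨h1, h2⟩
  have hkm : k + m < desc.length := by omega
  have hx : desc.getD (k + m) 0 < border := rest_lt desc border k hp hk hkm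
  simp only [okB, decide_eq_true_eq] at h2
  rw [Sseg_succ desc k m hkm] at h2
  have hPB : (m : Int) * border = (p : Int) + Sseg desc k m := by linarith
  have hc1 : (p : Int) + m = ((desc.length : Int) - k) := by omega
  push_cast at h2
  nlinarith [h2, hPB, hc1, hx]

lemma cond_iff (desc : List Int) (border : Int) (k m p : Nat)
    (hkm : k + m < desc.length) (hple : p ≤ desc.length)
    (hpI : (p : Int) = (m : Int) * border - Sseg desc k m) :
    (((desc.length - p : Nat) : Int) - (↑(k + m)) - 1 ≥ border - desc.getD (k + m) 0) ↔
      okB desc border k (m + 1) = true := by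
  simp only [okB, decide_eq_true_eq]
  rw [Sseg_succ desc k m hkm]
  have h1 : ((desc.length - p : Nat) : Int) = (desc.length : Int) - p := by omega
  rw [h1]
  have hPB : (m : Int) * border = (p : Int) + Sseg desc k m := by linarith
  push_cast
  constructor <;> intro h <;> nlinarith [hPB]

lemma ptr2 (desc : List Int) (border : Int) (k : Nat)
    (hp : desc.Pairwise (fun a b => b ≤ a)) (hk : kGood desc border k) :
    ∀ (fuel m p : Nat), m + p ≤ desc.length - k →
      ((p : Int) = (m : Int) * border - Sseg desc k m) →
      desc.length - k - m - p ≤ fuel →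
      ptrLoop desc border fuel (k + m) (desc.length - p) ((k : Int) + (m : Int)) =
        ((k + Tstar (desc.length - k) (okB desc border k) m : Nat) : Int) := by
  have hkn : k ≤ desc.length := hk.2.2
  intro fuel
  induction fuel with
  | zero =>
    intro m p hmp hpI hf
    have heq : m + p = desc.length - k := by omega
    rw [Tstar_stop desc border k hp hk m p heq hpI]
    simp only [ptrLoop]
    push_cast; ring
  | succ fuel ih =>
    intro m p hmp hpI hf
    by_cases hstop : m + p = desc.length - k
    · rw [Tstar_stop desc border k hp hk m p hstop hpI]
      simp only [ptrLoop]
      rw [if_neg (by omega)]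
      push_cast; ring
    · have hlt : m + p < desc.length - k := by omega
      have hkm : k + m < desc.length := by omega
      have hx : desc.getD (k + m) 0 < border := rest_lt desc border k hp hk hkm
      simp only [ptrLoop]
      rw [if_pos (by omega)]
      rw [if_neg (not_le.mpr hx)]
      by_cases hok : okB desc border k (m + 1) = true
      · have hcond := (cond_iff desc border k m p hkm (by omega) hpI).mpr hok
        rw [if_pos hcond]
        have hokI : ((m : Int) + 1) * border - (Sseg desc k m + desc.getD (k + m) 0) + ((m : Int) + 1)
            ≤ (desc.length : Int) - k := by
          have h2 := hok
          simp only [okB, decide_eq_true_eq] at h2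
          rw [Sseg_succ desc k m hkm] at h2
          push_cast at h2
          exact h2
        have hq0 : (0 : Int) ≤ border - desc.getD (k + m) 0 := by omega
        have hqI : ((border - desc.getD (k + m) 0).toNat : Int) = border - desc.getD (k + m) 0 :=
          Int.toNat_of_nonneg hq0
        have hq1 : 1 ≤ (border - desc.getD (k + m) 0).toNat := by omega
        have hPB : (m : Int) * border = (p : Int) + Sseg desc k m := by linarith
        have hmp' : (m + 1) + (p + (border - desc.getD (k + m) 0).toNat) ≤ desc.length - k := by
          have : ((p + (border - desc.getD (k + m) 0).toNat : Nat) : Int) + (m + 1)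
              ≤ ((desc.length : Int) - k) := by push_cast [hqI]; nlinarith [hokI, hPB]
          omega
        have hpI' : ((p + (border - desc.getD (k + m) 0).toNat : Nat) : Int)
            = ((m + 1 : Nat) : Int) * border - Sseg desc k (m + 1) := by
          rw [Sseg_succ desc k m hkm]
          push_cast [hqI]
          nlinarith [hPB]
        have hstate : desc.length - p - (border - desc.getD (k + m) 0).toNat
            = desc.length - (p + (border - desc.getD (k + m) 0).toNat) := by omega
        rw [hstate]
        have hcnt : ((k : Int) + (m : Int)) + 1 = (k : Int) + ((m + 1 : Nat) : Int) := by
          push_cast; ring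
        rw [hcnt]
        rw [Tstar_step (desc.length - k) (okB desc border k) m ⟨by omega, hok⟩]
        exact ih (m + 1) (p + (border - desc.getD (k + m) 0).toNat) hmp' hpI' (by omega)
      · have hcond : ¬ (((desc.length - p : Nat) : Int) - (↑(k + m)) - 1 ≥ border - desc.getD (k + m) 0) :=
          fun hc => hok ((cond_iff desc border k m p hkm (by omega) hpI).mp hc)
        rw [if_neg hcond]
        rw [Tstar, dif_neg (by rintro ⟨_, h2⟩; exact hok h2)]
        push_cast; ring


lemma ptr1 (desc : List Int) (border : Int) (k : Nat)
    (hp : desc.Pairwise (fun a b => b ≤ a)) (hk : kGood desc border k) :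
    ∀ (fuel j : Nat), j ≤ k → desc.length - j ≤ fuel →
      ptrLoop desc border fuel j desc.length ((j : Nat) : Int) =
        ((k + Tstar (desc.length - k) (okB desc border k) 0 : Nat) : Int) := by
  have hkn : k ≤ desc.length := hk.2.2
  intro fuel
  induction fuel with
  | zero =>
    intro j hj hf
    have h1 : j = k := by omega
    have h2 : desc.length - k = 0 := by omega
    simp only [ptrLoop]
    rw [h2, Tstar, dif_neg (by rintro ⟨h, _⟩; omega)]
    rw [h1]; simp
  | succ fuel ih =>
    intro j hj hf
    rcases Nat.lt_or_ge j k with hjk | hge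
    · simp only [ptrLoop]
      rw [if_pos (by omega), if_pos (hk.1 j hjk)]
      have hc : ((j : Nat) : Int) + 1 = ((j + 1 : Nat) : Int) := by push_cast; ring
      rw [hc]
      exact ih (j + 1) (by omega) (by omega)
    · have hje : j = k := by omega
      subst hje
      have h0 : ((0 : Nat) : Int) = ((0 : Nat) : Int) * border - Sseg desc j 0 := by
        simp [Sseg]
      have h := ptr2 desc border j hp hk (fuel + 1) 0 0 (by omega) h0 (by omega)
      simpa using h

-- ===== VERDICT (by name: the statement is the Claim_ definition above) =====
theorem cannibal_spec : Claim_equal_cannibal := by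
  intro input_numbers borders _
  unfold Spec_cannibal cannibal cannibal_alt
  simp only []
  refine List.map_congr_left ?_
  intro border _
  set desc := PySem.List.sorted (PySem.Set.ofList input_numbers) (fun x => x) true with hdesc
  have hp : desc.Pairwise (fun a b => b ≤ a) := PySem.List.sorted_pairwise_rev _ _
  have hA : cannibalLoopA border desc.length desc 0 0 = ptrLoop desc border desc.length 0 desc.length 0 := by
    have h := loop_eq desc border desc.length 0 desc.length 0 le_rfl
    rwa [List.take_length] at h
  have hkg : kGood desc border (bsK desc border desc.length 0 desc.length) :=
    bsK_spec desc border hp desc.length 0 desc.length (Nat.zero_le _) le_rfl (by omega)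
      (fun i hi => absurd hi (Nat.not_lt_zero i)) (fun i hi hlen => absurd hlen (by omega))
  set k := bsK desc border desc.length 0 desc.length with hkdef
  have hkn : k ≤ desc.length := hkg.2.2
  have hok0 : okB desc border k 0 = true := by
    simp only [okB, Sseg, decide_eq_true_eq, List.take_zero, List.sum_nil]
    push_cast
    omega
  have htg : tGood desc border k
      (bsT (desc.foldl (fun p v => p ++ [p.getLastD 0 + v]) [0]) border desc.length k
        (desc.length - k) 0 (desc.length - k)) :=
    bsT_spec desc border k hp hkg (desc.length - k) 0 (desc.length - k) (Nat.zero_le _)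
      le_rfl (by omega) hok0 (fun t h1 h2 => absurd h2 (by omega))
  have hT : tGood desc border k (Tstar (desc.length - k) (okB desc border k) 0) :=
    Tstar_spec desc border k 0 (Nat.zero_le _) hok0
  have ht_eq := tGood_unique desc border k hp hkg hT htg
  have hptr := ptr1 desc border k hp hkg desc.length 0 (Nat.zero_le _) (by omega)
  rw [hA]
  rw [← ht_eq]
  simpa using hptr
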